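-- pv_equiv track=rewrite | github.com/ThepokKung/seer_forklift_test | seer_robot_pkg/scripts/robot_controller.py | _parse_robot_numeric_id
-- ===== SOURCE A (Python) =====
-- def _parse_robot_numeric_id(robot_id_value: str):
--     """Extract the numeric robot identifier (e.g. robot_01 -> 1)."""
--     digits = ''.join(ch for ch in robot_id_value if ch.isdigit())
--     if not digits:
--         return None
--
--     try:
--         stripped = digits.lstrip('0') or '0'
--         numeric_id = int(stripped)
--     except ValueError:
--         return None
--
--     return numeric_id if numeric_id > 0 else None
-- ===== SOURCE B (Python) =====
-- def _parse_robot_numeric_id(robot_id_value: str):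
--     """Extract the numeric robot identifier (e.g. robot_01 -> 1)."""
--     num = 0
--     for ch in robot_id_value:
--         if ch.isdigit():
--             num = num * 10 + int(ch)
--     return num if num > 0 else None
-- ===== Notes on version B (the rewrite author's own statement) =====
-- stated objective: simpler
-- what changed: Single-pass Horner accumulation (num = num*10 + digit) over the characters replaces building a digit substring, lstrip-of-zeros and an int() call with try/except; no-digit and all-zero inputs fall out as num == 0 -> None.
import Mathlib
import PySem

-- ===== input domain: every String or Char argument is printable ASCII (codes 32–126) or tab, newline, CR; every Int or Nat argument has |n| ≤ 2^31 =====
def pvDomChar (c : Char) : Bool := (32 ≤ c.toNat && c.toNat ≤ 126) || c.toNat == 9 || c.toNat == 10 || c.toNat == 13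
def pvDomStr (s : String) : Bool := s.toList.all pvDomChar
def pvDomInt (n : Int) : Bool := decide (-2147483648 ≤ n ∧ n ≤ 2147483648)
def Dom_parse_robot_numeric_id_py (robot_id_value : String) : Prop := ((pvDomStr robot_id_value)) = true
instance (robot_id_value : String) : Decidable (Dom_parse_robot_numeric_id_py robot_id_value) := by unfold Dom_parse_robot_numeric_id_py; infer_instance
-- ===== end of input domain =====

-- ===== PORT A =====
-- B (below) replaces A's digit-substring + lstrip + int() pipeline by a single Horner pass (objective: simpler).
-- Hand port of Python's int(stripped): in A, `stripped` is always a nonempty string of isdigit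
-- characters ('0'..'9'), on which int() returns the decimal value and never raises; this helper is
-- exact there (none mirrors ValueError on the empty / non-decimal-digit case).
def pvIntDigits? (ds : List Char) : Option Int :=
  if ds = [] then none
  else if ds.all PySem.Chars.isdigit then
    some (ds.foldl (fun a c => a * 10 + ((c.toNat : Int) - 48)) 0)
  else none

def parse_robot_numeric_id_py (robot_id_value : String) : Option Int :=
  let digits := robot_id_value.toList.filter PySem.Chars.isdigit
  if digits = [] then none
  else
    let stripped := if digits.dropWhile (· == '0') = [] then ['0']
                    else digits.dropWhile (· == '0')
    match pvIntDigits? stripped with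
    | none => none
    | some numeric_id => if numeric_id > 0 then some numeric_id else none

-- ===== PORT B =====
-- int(ch) for a ch with ch.isdigit() is ord(ch) - 48; exact: PySem.Chars.isdigit is exactly '0'..'9'.
def parse_robot_numeric_id_py_alt (robot_id_value : String) : Option Int :=
  let num := robot_id_value.toList.foldl
    (fun num c => if PySem.Chars.isdigit c then num * 10 + ((c.toNat : Int) - 48) else num) 0
  if num > 0 then some num else none

-- ===== PRECONDITION & SPEC =====
def Spec_parse_robot_numeric_id_py (robot_id_value : String) (out : Option Int) : Prop := out = parse_robot_numeric_id_py_alt robot_id_value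
instance (robot_id_value : String) (out : Option Int) : Decidable (Spec_parse_robot_numeric_id_py robot_id_value out) := by unfold Spec_parse_robot_numeric_id_py; infer_instance

-- ===== CLAIM (what is proved, stated in full; the proofs are below) =====
def Claim_equal_parse_robot_numeric_id_py : Prop := ∀ (robot_id_value : String), Dom_parse_robot_numeric_id_py robot_id_value → Spec_parse_robot_numeric_id_py robot_id_value (parse_robot_numeric_id_py robot_id_value)

-- ===== LEMMAS AND PROOFS =====

-- Horner step used by both sides.
def pvHorner (a : Int) (c : Char) : Int := a * 10 + ((c.toNat : Int) - 48)

lemma pvHorner_zeros (zs : List Char) (h : ∀ c ∈ zs, c = '0') :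
    zs.foldl pvHorner 0 = 0 := by
  induction zs with
  | nil => rfl
  | cons c zs ih =>
    have hc : c = '0' := h c (List.mem_cons_self ..)
    have : pvHorner 0 c = 0 := by subst hc; rfl
    simpa [List.foldl_cons, this] using ih (fun d hd => h d (List.mem_cons_of_mem _ hd))

lemma pvHorner_strip (ds : List Char) :
    (∀ c ∈ ds.takeWhile (· == '0'), c = '0') →
    ds.foldl pvHorner 0 = (ds.dropWhile (· == '0')).foldl pvHorner 0 := by
  intro h
  conv_lhs => rw [← List.takeWhile_append_dropWhile (p := (· == '0')) (l := ds)]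
  rw [List.foldl_append, pvHorner_zeros _ h]

lemma pv_takeWhile_zeros (ds : List Char) : ∀ c ∈ ds.takeWhile (· == '0'), c = '0' := by
  intro c hc
  simpa using List.mem_takeWhile_imp hc

-- ===== VERDICT (by name: the statement is the Claim_ definition above) =====
theorem parse_robot_numeric_id_py_spec : Claim_equal_parse_robot_numeric_id_py := by
  intro s _
  unfold Spec_parse_robot_numeric_id_py parse_robot_numeric_id_py parse_robot_numeric_id_py_alt
  have hB : s.toList.foldl
      (fun num c => if PySem.Chars.isdigit c then num * 10 + ((c.toNat : Int) - 48) else num) 0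
      = (s.toList.filter PySem.Chars.isdigit).foldl pvHorner 0 := by
    rw [List.foldl_filter]; rfl
  simp only [hB]
  set digits := s.toList.filter PySem.Chars.isdigit with hdig
  by_cases h0 : digits = []
  · simp [h0]
  · simp only [if_neg h0]
    have hstrip := pvHorner_strip digits (pv_takeWhile_zeros digits)
    by_cases ht : digits.dropWhile (· == '0') = []
    · -- all zeros: A returns int('0') = 0 -> none; B's accumulator is 0 -> none
      rw [ht] at hstrip
      simp [ht, pvIntDigits?, hstrip, PySem.Chars.isdigit]
    · -- stripped nonempty: its chars all come from the filter, so int succeeds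
      have hall : (digits.dropWhile (· == '0')).all PySem.Chars.isdigit = true := by
        rw [List.all_eq_true]
        intro c hc
        have : c ∈ digits := (List.dropWhile_sublist _).subset hc
        exact (List.mem_filter.mp (hdig ▸ this)).2
      simp only [if_neg ht, pvIntDigits?, hall, if_true, hstrip]
      rfl
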